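-- pv_equiv track=rewrite | github.com/tsilva/gymnasium-solver | utils/environment_registry.py | find_closest_match
-- ===== SOURCE A (Python) =====
-- def find_closest_match(search_term, candidates):
--     """Find the closest match for a search term among candidates using fuzzy matching."""
--     if not search_term:
--         return None
--
--     search_lower = search_term.lower()
--     candidates_lower = [c.lower() for c in candidates]
--
--     # Exact match first
--     for i, candidate in enumerate(candidates_lower):
--         if search_lower == candidate:
--             return candidates[i]
--
--     # Substring match
--     for i, candidate in enumerate(candidates_lower):
--         if search_lower in candidate or candidate in search_lower:
--             return candidates[i]
--
--     # Word-based matching (split on hyphens and underscores)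
--     search_words = set(search_lower.replace('-', ' ').replace('_', ' ').split())
--
--     best_match = None
--     best_score = 0
--
--     for i, candidate in enumerate(candidates_lower):
--         candidate_words = set(candidate.replace('-', ' ').replace('_', ' ').split())
--
--         # Calculate overlap score
--         overlap = len(search_words.intersection(candidate_words))
--         if overlap > best_score:
--             best_score = overlap
--             best_match = candidates[i]
--
--     return best_match if best_score > 0 else None
-- ===== SOURCE B (Python) =====
-- def find_closest_match(search_term, candidates):
--     """One-pass variant: rank every candidate by a tiered (tier, score) key and keep the first strict maximum."""
--     if not search_term:
--         return None
--     sl = search_term.lower()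
--     sw = set(sl.replace('-', ' ').replace('_', ' ').split())
--     best, best_key = None, (0, 0)
--     for c in candidates:
--         cl = c.lower()
--         if cl == sl:
--             k = (3, 0)
--         elif sl in cl or cl in sl:
--             k = (2, 0)
--         else:
--             ov = len(sw & set(cl.replace('-', ' ').replace('_', ' ').split()))
--             k = (1, ov) if ov else (0, 0)
--         if k > best_key:
--             best, best_key = c, k
--     return best
-- ===== Notes on version B (the rewrite author's own statement) =====
-- stated objective: simpler
-- what changed: Replaces A's three sequential scans (exact, substring, word-overlap argmax) by a single left-to-right pass that ranks each candidate with a composite (tier, score) key and keeps the first strict maximum.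
import Mathlib
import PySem

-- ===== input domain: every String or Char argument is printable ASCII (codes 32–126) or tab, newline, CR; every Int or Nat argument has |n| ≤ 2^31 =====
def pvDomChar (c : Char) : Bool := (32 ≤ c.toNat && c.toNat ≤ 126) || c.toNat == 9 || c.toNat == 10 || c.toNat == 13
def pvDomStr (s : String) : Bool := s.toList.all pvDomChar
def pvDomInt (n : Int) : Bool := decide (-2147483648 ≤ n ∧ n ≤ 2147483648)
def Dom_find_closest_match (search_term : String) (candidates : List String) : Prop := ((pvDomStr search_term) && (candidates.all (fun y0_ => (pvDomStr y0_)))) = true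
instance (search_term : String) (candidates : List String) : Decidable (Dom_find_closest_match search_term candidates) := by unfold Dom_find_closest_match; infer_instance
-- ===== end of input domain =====

-- B replaces A's three sequential scans by a single pass with a composite (tier, score) key; same results, simpler shape.

-- ===== PORT A =====
-- word set of an (already lowercased) string: split on '-'/'_' and whitespace, as a set
def pvWords (s : String) : PySem.Set String :=
  PySem.Set.ofList (PySem.Str.split₀ (PySem.Str.replace (PySem.Str.replace s "-" " ") "_" " "))

-- first exact match: loop 'for i, candidate in enumerate(candidates_lower): if search_lower == candidate: return candidates[i]'
def pvFindExact (sl : String) : List (String × String) → Option String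
  | [] => none
  | (c, cl) :: rest => if cl = sl then some c else pvFindExact sl rest

-- substring loop
def pvFindSub (sl : String) : List (String × String) → Option String
  | [] => none
  | (c, cl) :: rest =>
      if PySem.Str.isIn sl cl || PySem.Str.isIn cl sl then some c else pvFindSub sl rest

-- word-overlap loop with state (best_match, best_score)
def pvWordLoop (sw : PySem.Set String) : List (String × String) → Option String × Nat → Option String × Nat
  | [], st => st
  | (c, cl) :: rest, (bm, bs) =>
      if bs < (PySem.Set.inter sw (pvWords cl)).length then
        pvWordLoop sw rest (some c, (PySem.Set.inter sw (pvWords cl)).length)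
      else pvWordLoop sw rest (bm, bs)

def find_closest_match (search_term : String) (candidates : List String) : Option String :=
  if search_term = "" then none
  else
    let sl := PySem.Str.lower search_term
    let pairs := candidates.zip (candidates.map PySem.Str.lower)
    match pvFindExact sl pairs with
    | some c => some c
    | none =>
      match pvFindSub sl pairs with
      | some c => some c
      | none =>
        let sw := pvWords sl
        let r := pvWordLoop sw pairs (none, 0)
        if 0 < r.2 then r.1 else none

-- ===== PORT B =====
-- composite key: (3,0) exact, (2,0) substring, (1,ov) positive word overlap, (0,0) otherwise
def pvKey (sl : String) (sw : PySem.Set String) (c : String) : Nat × Nat :=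
  if PySem.Str.lower c = sl then (3, 0)
  else if PySem.Str.isIn sl (PySem.Str.lower c) || PySem.Str.isIn (PySem.Str.lower c) sl then (2, 0)
  else if 0 < (PySem.Set.inter sw (pvWords (PySem.Str.lower c))).length then
    (1, (PySem.Set.inter sw (pvWords (PySem.Str.lower c))).length)
  else (0, 0)

-- Python tuple comparison k > best_key on pairs of nats
def pvGt (a b : Nat × Nat) : Bool := b.1 < a.1 || (a.1 == b.1 && b.2 < a.2)

-- the single pass: state (best, best_key)
def pvFoldB (sl : String) (sw : PySem.Set String) :
    List String → Option String × (Nat × Nat) → Option String × (Nat × Nat)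
  | [], st => st
  | c :: rest, (best, bk) =>
      let k := pvKey sl sw c
      if pvGt k bk then pvFoldB sl sw rest (some c, k) else pvFoldB sl sw rest (best, bk)

def find_closest_match_alt (search_term : String) (candidates : List String) : Option String :=
  if search_term = "" then none
  else
    let sl := PySem.Str.lower search_term
    let sw := pvWords sl
    (pvFoldB sl sw candidates (none, (0, 0))).1

-- ===== PRECONDITION & SPEC =====
def Spec_find_closest_match (search_term : String) (candidates : List String) (out : Option String) : Prop := out = find_closest_match_alt search_term candidates
instance (search_term : String) (candidates : List String) (out : Option String) : Decidable (Spec_find_closest_match search_term candidates out) := by unfold Spec_find_closest_match; infer_instance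

-- ===== CLAIM (what is proved, stated in full; the proofs are below) =====
def Claim_equal_find_closest_match : Prop := ∀ (search_term : String) (candidates : List String), Dom_find_closest_match search_term candidates → Spec_find_closest_match search_term candidates (find_closest_match search_term candidates)

-- ===== LEMMAS AND PROOFS =====

-- once the fold has reached key (3,0), nothing later changes the state
lemma pvFoldB_top (sl : String) (sw : PySem.Set String) :
    ∀ (cs : List String) (bm : Option String),
      pvFoldB sl sw cs (bm, (3, 0)) = (bm, (3, 0)) := by
  intro cs
  induction cs with
  | nil => intro bm; rfl
  | cons c rest ih =>
      intro bm
      simp only [pvFoldB]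
      have hg : pvGt (pvKey sl sw c) (3, 0) = false := by
        unfold pvKey pvGt
        split_ifs <;> simp
      rw [if_neg (by simp [hg])]
      exact ih bm

-- from a (2,0) state, only a later exact match can win
lemma pvFoldB_sub (sl : String) (sw : PySem.Set String) :
    ∀ (cs : List String) (bm : Option String),
      pvFoldB sl sw cs (bm, (2, 0)) =
        match pvFindExact sl (cs.zip (cs.map PySem.Str.lower)) with
        | some e => (some e, (3, 0))
        | none => (bm, (2, 0)) := by
  intro cs
  induction cs with
  | nil => intro bm; rfl
  | cons c rest ih =>
      intro bm
      simp only [List.map_cons, List.zip_cons_cons, pvFoldB, pvFindExact]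
      by_cases h3 : PySem.Str.lower c = sl
      · have hk : pvKey sl sw c = (3, 0) := by unfold pvKey; rw [if_pos h3]
        rw [hk]
        rw [if_pos (by decide : pvGt (3,0) (2,0) = true), if_pos h3, pvFoldB_top]
      · have hg : pvGt (pvKey sl sw c) (2, 0) = false := by
          unfold pvKey pvGt
          rw [if_neg h3]
          split_ifs <;> simp
        rw [if_neg (by simp [hg]), if_neg h3]
        exact ih bm

-- from a tier ≤ 1 state, the fold computes exactly A's exact / substring / word-loop cascade
lemma pvFoldB_low (sl : String) (sw : PySem.Set String) :
    ∀ (cs : List String) (bm : Option String) (s : Nat),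
      pvFoldB sl sw cs (bm, ((if 0 < s then 1 else 0), s)) =
        match pvFindExact sl (cs.zip (cs.map PySem.Str.lower)) with
        | some e => (some e, (3, 0))
        | none =>
          match pvFindSub sl (cs.zip (cs.map PySem.Str.lower)) with
          | some u => (some u, (2, 0))
          | none =>
            let r := pvWordLoop sw (cs.zip (cs.map PySem.Str.lower)) (bm, s)
            (r.1, ((if 0 < r.2 then 1 else 0), r.2)) := by
  intro cs
  induction cs with
  | nil => intro bm s; rfl
  | cons c rest ih =>
      intro bm s
      simp only [List.map_cons, List.zip_cons_cons, pvFoldB, pvFindExact, pvFindSub, pvWordLoop]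
      by_cases h3 : PySem.Str.lower c = sl
      · have hk : pvKey sl sw c = (3, 0) := by unfold pvKey; rw [if_pos h3]
        rw [hk]
        have hg : pvGt (3, 0) ((if 0 < s then 1 else 0), s) = true := by
          unfold pvGt; split_ifs <;> simp
        rw [if_pos hg, if_pos h3, pvFoldB_top]
      · simp only [if_neg h3]
        by_cases h2 : (PySem.Str.isIn sl (PySem.Str.lower c) || PySem.Str.isIn (PySem.Str.lower c) sl) = true
        · have hk : pvKey sl sw c = (2, 0) := by unfold pvKey; rw [if_neg h3, if_pos h2]
          rw [hk]
          have hg : pvGt (2, 0) ((if 0 < s then 1 else 0), s) = true := by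
            unfold pvGt; split_ifs <;> simp
          rw [if_pos hg, if_pos h2, pvFoldB_sub]
        · simp only [if_neg h2]
          by_cases hlt : s < (PySem.Set.inter sw (pvWords (PySem.Str.lower c))).length
          · have hk : pvKey sl sw c = (1, (PySem.Set.inter sw (pvWords (PySem.Str.lower c))).length) := by
              unfold pvKey
              rw [if_neg h3, if_neg h2, if_pos (by omega)]
            have hg : pvGt (1, (PySem.Set.inter sw (pvWords (PySem.Str.lower c))).length)
                ((if 0 < s then 1 else 0), s) = true := by
              unfold pvGt; split_ifs <;> simp; omega
            rw [hk, if_pos hg]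
            simp only [if_pos hlt]
            have h1 := ih (some c) ((PySem.Set.inter sw (pvWords (PySem.Str.lower c))).length)
            rw [if_pos (by omega : 0 < (PySem.Set.inter sw (pvWords (PySem.Str.lower c))).length)] at h1
            exact h1
          · have hg : pvGt (pvKey sl sw c) ((if 0 < s then 1 else 0), s) = false := by
              unfold pvKey pvGt
              rw [if_neg h3, if_neg h2]
              split_ifs <;> simp <;> omega
            rw [if_neg (by simp [hg])]
            simp only [if_neg hlt]
            exact ih bm s

-- the word-loop score never decreases
lemma pvWordLoop_score_mono (sw : PySem.Set String) :
    ∀ (l : List (String × String)) (bm : Option String) (s : Nat),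
      s ≤ (pvWordLoop sw l (bm, s)).2 := by
  intro l
  induction l with
  | nil => intro bm s; exact le_refl _
  | cons p rest ih =>
      intro bm s
      obtain ⟨c, cl⟩ := p
      simp only [pvWordLoop]
      split_ifs with h
      · exact le_trans (le_of_lt h) (ih (some c) _)
      · exact ih bm s

-- the word loop started from (none, 0) returns best_match = none whenever best_score = 0
lemma pvWordLoop_zero (sw : PySem.Set String) :
    ∀ (l : List (String × String)),
      (pvWordLoop sw l ((none : Option String), 0)).2 = 0 →
      (pvWordLoop sw l ((none : Option String), 0)).1 = none := by
  intro l
  induction l with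
  | nil => intro _; rfl
  | cons p rest ih =>
      obtain ⟨c, cl⟩ := p
      intro h
      simp only [pvWordLoop] at h ⊢
      split_ifs at h ⊢ with hlt
      · exfalso
        have := pvWordLoop_score_mono sw rest (some c)
          ((PySem.Set.inter sw (pvWords cl)).length)
        omega
      · exact ih h

-- ===== VERDICT (by name: the statement is the Claim_ definition above) =====
theorem find_closest_match_spec : Claim_equal_find_closest_match := by
  intro search_term candidates _
  unfold Spec_find_closest_match
  by_cases hemp : search_term = ""
  · simp [find_closest_match, find_closest_match_alt, hemp]
  · simp only [find_closest_match, find_closest_match_alt, if_neg hemp]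
    have h := pvFoldB_low (PySem.Str.lower search_term) (pvWords (PySem.Str.lower search_term))
      candidates none 0
    rw [if_neg (by omega : ¬ (0:Nat) < 0)] at h
    rw [h]
    cases hfe : pvFindExact (PySem.Str.lower search_term)
        (candidates.zip (candidates.map PySem.Str.lower)) with
    | some e => rfl
    | none =>
      cases hfs : pvFindSub (PySem.Str.lower search_term)
          (candidates.zip (candidates.map PySem.Str.lower)) with
      | some u => rfl
      | none =>
        simp only []
        by_cases hpos : 0 < (pvWordLoop (pvWords (PySem.Str.lower search_term))
            (candidates.zip (candidates.map PySem.Str.lower)) ((none : Option String), 0)).2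
        · simp only [if_pos hpos]
        · simp only [if_neg hpos]
          have hz := pvWordLoop_zero (pvWords (PySem.Str.lower search_term))
            (candidates.zip (candidates.map PySem.Str.lower)) (by omega)
          rw [hz]
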